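-- pv_equiv track=rewrite | github.com/Ejhfast/iris-agent | backend/iris/util.py | word_overlap
-- ===== SOURCE A (Python) =====
-- from collections import defaultdict
--
-- def word_overlap(sen1, sents):
--     count_hash = defaultdict(int)
--     for w1 in sen1.lower().strip().split():
--         for s in sents.keys():
--             for w2 in s.lower().strip().split():
--                 if w1 == w2:
--                     count_hash[s] += 1
--     sort = sorted(sents.items(), key=lambda x: count_hash[x[0]], reverse=True)
--     return [x[0] for x in sort], sort[0][1]
-- ===== SOURCE B (Python) =====
-- from collections import Counter
--
-- def word_overlap(sen1, sents):
--     freq = Counter(sen1.lower().strip().split())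
--     ordered = sorted(sents.items(),
--                      key=lambda kv: sum(freq[w] for w in kv[0].lower().strip().split()),
--                      reverse=True)
--     return [k for k, _ in ordered], ordered[0][1]
-- ===== Notes on version B (the rewrite author's own statement) =====
-- stated objective: simpler
-- what changed: B replaces A's triple nested loop (for each word of sen1, rescan every sentence's words) by a Counter of sen1's words built once and a per-sentence sum of word frequencies used directly as the sort key; the reverse-sorted order and sort[0][1] return are unchanged. Pre_ excludes an empty sents, on which both programs raise IndexError at sort[0], and association lists with duplicate keys, which do not represent a Python dict.
import Mathlib
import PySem

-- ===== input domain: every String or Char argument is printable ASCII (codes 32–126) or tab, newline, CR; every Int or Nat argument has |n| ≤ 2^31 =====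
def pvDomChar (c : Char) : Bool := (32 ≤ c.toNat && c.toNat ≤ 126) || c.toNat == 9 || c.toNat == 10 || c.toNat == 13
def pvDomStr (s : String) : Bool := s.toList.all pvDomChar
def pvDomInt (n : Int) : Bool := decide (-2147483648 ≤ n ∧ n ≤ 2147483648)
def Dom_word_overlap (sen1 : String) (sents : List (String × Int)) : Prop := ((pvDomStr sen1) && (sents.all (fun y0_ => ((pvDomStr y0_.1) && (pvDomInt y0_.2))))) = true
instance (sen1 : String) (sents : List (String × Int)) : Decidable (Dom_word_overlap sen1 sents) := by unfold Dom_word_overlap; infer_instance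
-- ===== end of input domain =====

-- ===== PORT A =====
-- B replaces A's triple nested counting loop by a Counter of sen1's words and a per-sentence frequency sum; return value only.
-- shared helper: s.lower().strip().split()
def pvWords (s : String) : List String := PySem.Str.split₀ (PySem.Str.strip (PySem.Str.lower s))

def word_overlap (sen1 : String) (sents : List (String × Int)) : List String × Int :=
  let count_hash : PySem.Dict String Int :=
    (pvWords sen1).foldl (fun d w1 =>
      (sents.map Prod.fst).foldl (fun d s =>
        (pvWords s).foldl (fun d w2 =>
          if w1 == w2 then d.modify s 0 (· + 1) else d) d) d)
      PySem.Dict.empty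
  let sort := PySem.List.sorted sents (fun x => count_hash.getD x.1 0) true
  (sort.map Prod.fst, (PySem.List.pyGetD sort 0 ("", 0)).2)

-- ===== PORT B =====
def word_overlap_alt (sen1 : String) (sents : List (String × Int)) : List String × Int :=
  let freq := PySem.Dict.counter (pvWords sen1)
  let ordered := PySem.List.sorted sents
    (fun kv => ((pvWords kv.1).map (fun w => freq.getD w 0)).sum) true
  (ordered.map Prod.fst, (PySem.List.pyGetD ordered 0 ("", 0)).2)

-- ===== PRECONDITION & SPEC =====
-- Pre_ excludes (a) empty sents: both programs raise IndexError at sort[0]; (b) duplicate keys, which a Python dict cannot contain.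
def Pre_word_overlap (sen1 : String) (sents : List (String × Int)) : Prop :=
  sents ≠ [] ∧ (sents.map Prod.fst).Nodup
instance (sen1 : String) (sents : List (String × Int)) : Decidable (Pre_word_overlap sen1 sents) := by unfold Pre_word_overlap; infer_instance
def pvWitness_word_overlap : String × (List (String × Int)) := ("a b a", [("b a", 3), ("c", 1)])

def Spec_word_overlap (sen1 : String) (sents : List (String × Int)) (out : List String × Int) : Prop := out = word_overlap_alt sen1 sents
instance (sen1 : String) (sents : List (String × Int)) (out : List String × Int) : Decidable (Spec_word_overlap sen1 sents out) := by unfold Spec_word_overlap; infer_instance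

-- ===== CLAIM (what is proved, stated in full; the proofs are below) =====
def Claim_equal_word_overlap : Prop := ∀ (sen1 : String) (sents : List (String × Int)), Dom_word_overlap sen1 sents → Pre_word_overlap sen1 sents → Spec_word_overlap sen1 sents (word_overlap sen1 sents)

-- ===== LEMMAS AND PROOFS =====

-- inner loop of A: scanning ws for hits of w1 adds ws.count w1 to key s
lemma pv_inner (ws : List String) (w1 s t : String) (d : PySem.Dict String Int) :
    ((ws.foldl (fun d w2 => if w1 == w2 then d.modify s 0 (· + 1) else d) d).getD t 0)
      = d.getD t 0 + if t = s then (ws.count w1 : Int) else 0 := by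
  induction ws generalizing d with
  | nil => simp
  | cons w ws ih =>
    simp only [List.foldl_cons]
    rw [ih]
    by_cases hw : w1 = w
    · subst hw
      rw [if_pos (show (w1 == w1) = true by simp)]
      simp only [PySem.Dict.modify, PySem.Dict.getD_insert, List.count_cons,
        beq_self_eq_true, if_true]
      split_ifs with h
      · subst h; push_cast; ring
      · rfl
    · have hb : (w == w1) = false := by
        simp only [beq_eq_false_iff_ne, ne_eq]
        exact fun h => hw h.symm
      rw [if_neg (by simp [hw]), List.count_cons]
      simp only [hb, Bool.false_eq_true, if_false, add_zero]

-- middle loop of A: one word w1 scanned against every key in ks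
lemma pv_mid (ks : List String) (w1 t : String) (d : PySem.Dict String Int) :
    ((ks.foldl (fun d s =>
        (pvWords s).foldl (fun d w2 => if w1 == w2 then d.modify s 0 (· + 1) else d) d) d).getD t 0)
      = d.getD t 0 + (ks.count t : Int) * ((pvWords t).count w1 : Int) := by
  induction ks generalizing d with
  | nil => simp only [List.foldl_nil, List.count_nil, Nat.cast_zero, zero_mul, add_zero]
  | cons k ks ih =>
    simp only [List.foldl_cons]
    rw [ih, pv_inner, List.count_cons]
    by_cases h : t = k
    · subst h
      simp only [beq_self_eq_true, if_true]
      simp only [Nat.cast_add, Nat.cast_one]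
      ring
    · have hb : (k == t) = false := by
        simp only [beq_eq_false_iff_ne, ne_eq]
        exact fun h' => h h'.symm
      simp only [hb, Bool.false_eq_true, if_false, if_neg h, add_zero]

-- full counting loop of A
lemma pv_outer (ws1 : List String) (ks : List String) (t : String) (d : PySem.Dict String Int) :
    ((ws1.foldl (fun d w1 =>
        ks.foldl (fun d s =>
          (pvWords s).foldl (fun d w2 => if w1 == w2 then d.modify s 0 (· + 1) else d) d) d) d).getD t 0)
      = d.getD t 0 + (ks.count t : Int) * ((ws1.map (fun w1 => ((pvWords t).count w1 : Int))).sum) := by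
  induction ws1 generalizing d with
  | nil => simp only [List.foldl_nil, List.map_nil, List.sum_nil, mul_zero, add_zero]
  | cons w ws ih =>
    simp only [List.foldl_cons]
    rw [ih, pv_mid]
    simp only [List.map_cons, List.sum_cons]
    ring

-- double counting, one step: prepending a to l1 adds l2.count a to the total
lemma pv_cons_sum (a : String) (l1 l2 : List String) :
    (l2.map (fun b => ((a :: l1).count b : Int))).sum
      = (l2.map (fun b => ((l1.count b : Nat) : Int))).sum + (l2.count a : Int) := by
  have h1 : (l2.map (fun b => ((a :: l1).count b : Int))).sum
      = (l2.map (fun b => ((l1.count b : Nat) : Int) + if (a == b) = true then 1 else 0)).sum := by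
    congr 1
    refine List.map_congr_left (fun b _ => ?_)
    rw [List.count_cons]
    push_cast
    rfl
  rw [h1, PySem.List.sum_map_add_int, PySem.List.sum_map_ite_one_zero]
  congr 1
  rw [List.count_eq_countP]
  congr 1
  refine List.countP_congr (fun x _ => ?_)
  by_cases hx : a = x
  · subst hx; rfl
  · rw [beq_eq_false_iff_ne.mpr hx, beq_eq_false_iff_ne.mpr (fun h => hx h.symm)]

-- double counting: sum over l1 of counts in l2 = sum over l2 of counts in l1
lemma pv_count_comm (l1 l2 : List String) :
    (l1.map (fun a => ((l2.count a : Nat) : Int))).sum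
      = (l2.map (fun b => ((l1.count b : Nat) : Int))).sum := by
  induction l1 with
  | nil => simp
  | cons a l1 ih =>
    rw [pv_cons_sum]
    simp only [List.map_cons, List.sum_cons, ih]
    ring

-- insertBy only compares the new element with list members
lemma pv_insertBy_congr (b1 b2 : (String × Int) → (String × Int) → Bool) (x : String × Int)
    (ys : List (String × Int)) (h : ∀ y ∈ ys, b1 x y = b2 x y) :
    PySem.List.insertBy b1 x ys = PySem.List.insertBy b2 x ys := by
  induction ys with
  | nil => rfl
  | cons y ys ih =>
    simp only [PySem.List.insertBy, h y (by simp)]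
    split
    · rfl
    · simp only [List.cons.injEq, true_and]
      exact ih (fun z hz => h z (by simp [hz]))

-- stable reverse sort only depends on the key's values on the list's members
lemma pv_sorted_congr (xs : List (String × Int)) (k1 k2 : (String × Int) → Int)
    (h : ∀ x ∈ xs, k1 x = k2 x) :
    PySem.List.sorted xs k1 true = PySem.List.sorted xs k2 true := by
  rw [PySem.List.sorted_rev_eq_foldl_insertBy, PySem.List.sorted_rev_eq_foldl_insertBy]
  suffices H : ∀ (l : List (String × Int)) (acc : List (String × Int)),
      (∀ x ∈ l, k1 x = k2 x) → (∀ x ∈ acc, k1 x = k2 x) →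
      l.foldl (fun acc x => PySem.List.insertBy (fun a b => decide (k1 b < k1 a)) x acc) acc
        = l.foldl (fun acc x => PySem.List.insertBy (fun a b => decide (k2 b < k2 a)) x acc) acc by
    exact H xs [] h (by simp)
  intro l
  induction l with
  | nil => intro acc _ _; rfl
  | cons x l ih =>
    intro acc hl hacc
    simp only [List.foldl_cons]
    have hx : k1 x = k2 x := hl x (by simp)
    rw [pv_insertBy_congr (fun a b => decide (k1 b < k1 a)) (fun a b => decide (k2 b < k2 a)) x acc
          (fun y hy => by simp only [hx, hacc y hy])]
    refine ih _ (fun z hz => hl z (by simp [hz])) (fun z hz => ?_)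
    rcases (PySem.List.mem_insertBy (fun a b => decide (k2 b < k2 a)) x z acc).1 hz with h' | h'
    · subst h'; exact hl z (by simp)
    · exact hacc z h'

-- the two sort keys agree on every element of sents (keys nodup)
lemma pv_keys_agree (sen1 : String) (sents : List (String × Int))
    (hnd : (sents.map Prod.fst).Nodup) (kv : String × Int) (hkv : kv ∈ sents) :
    ((pvWords sen1).foldl (fun d w1 =>
        (sents.map Prod.fst).foldl (fun d s =>
          (pvWords s).foldl (fun d w2 => if w1 == w2 then d.modify s 0 (· + 1) else d) d) d)
      PySem.Dict.empty).getD kv.1 0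
      = ((pvWords kv.1).map (fun w => (PySem.Dict.counter (pvWords sen1)).getD w 0)).sum := by
  have hmem : kv.1 ∈ sents.map Prod.fst := List.mem_map_of_mem hkv
  have hcnt : (sents.map Prod.fst).count kv.1 = 1 :=
    List.count_eq_one_of_mem hnd hmem
  rw [pv_outer, PySem.Dict.getD_empty, hcnt]
  have hr : ((pvWords kv.1).map (fun w => (PySem.Dict.counter (pvWords sen1)).getD w 0)).sum
      = ((pvWords kv.1).map (fun w => (((pvWords sen1).count w : Nat) : Int))).sum := by
    exact congrArg List.sum (List.map_congr_left (fun w _ => PySem.Dict.getD_counter _ _))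
  rw [pv_count_comm (pvWords sen1) (pvWords kv.1), hr]
  simp only [Nat.cast_one, one_mul, zero_add]

-- ===== VERDICT (by name: the statement is the Claim_ definition above) =====
theorem word_overlap_spec : Claim_equal_word_overlap := by
  intro sen1 sents _ hpre
  unfold Spec_word_overlap
  simp only [word_overlap, word_overlap_alt]
  rw [pv_sorted_congr sents _ _ (fun kv hkv => pv_keys_agree sen1 sents hpre.2 kv hkv)]
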